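-- pv_equiv track=rewrite | github.com/avivohayon/NLP | ex2/ex2nlp.py | create_tags_per_each_word_dict
-- ===== SOURCE A (Python) =====
-- def create_tags_per_each_word_dict(tagged_text):
--     """
--     param: tagged text: the text which each sentence is a tuple (word, tag)
--     return tag_per_word_dict: dict where its keys: tags, value: a dict of all the words with the key as tags
--     """
--     tag_per_word_dict = dict()
--     for sent in tagged_text:
--         for tagged_word in sent:
--             clean_tag = tagged_word[1]
--             if tagged_word[0] not in tag_per_word_dict.keys():
--                 tag_per_word_dict[tagged_word[0]] = dict()
--                 tag_per_word_dict[tagged_word[0]][clean_tag] = 1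
--             else:
--                 tags_dict = tag_per_word_dict[tagged_word[0]]
--                 if clean_tag not in tags_dict.keys():
--                     tags_dict[clean_tag] = 1
--                 else:
--                     tags_dict[clean_tag] += 1
--
--     return tag_per_word_dict
-- ===== SOURCE B (Python) =====
-- def create_tags_per_each_word_dict(tagged_text):
--     # Pass 1: flat tally of (word, tag) pairs; pass 2: regroup the tally into nested dicts.
--     counts = {}
--     for sent in tagged_text:
--         for pair in sent:
--             counts[pair] = counts.get(pair, 0) + 1
--     result = {}
--     for (word, tag), n in counts.items():
--         if word not in result:
--             result[word] = {}
--         result[word][tag] = n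
--     return result
-- ===== Notes on version B (the rewrite author's own statement) =====
-- stated objective: alternative
-- what changed: A builds the nested word->tag->count dicts incrementally with a branch per pair; B first makes one flat tally dict keyed by (word, tag) pairs and then regroups the tally's items into the nested dicts in a second pass.
import Mathlib
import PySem

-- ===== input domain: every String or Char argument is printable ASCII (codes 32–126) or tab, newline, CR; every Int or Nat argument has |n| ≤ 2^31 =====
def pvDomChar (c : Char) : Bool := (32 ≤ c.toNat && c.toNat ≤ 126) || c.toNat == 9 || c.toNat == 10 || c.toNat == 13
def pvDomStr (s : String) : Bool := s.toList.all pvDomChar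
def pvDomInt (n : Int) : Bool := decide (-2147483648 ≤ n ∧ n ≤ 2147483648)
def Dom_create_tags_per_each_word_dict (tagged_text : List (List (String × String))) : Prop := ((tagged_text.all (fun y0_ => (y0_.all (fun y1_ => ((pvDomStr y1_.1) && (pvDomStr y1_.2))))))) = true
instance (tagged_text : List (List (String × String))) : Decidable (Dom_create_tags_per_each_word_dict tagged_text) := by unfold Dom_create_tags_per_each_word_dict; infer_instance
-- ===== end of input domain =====

-- B replaces A's incremental nested-dict branching by a flat (word,tag) tally pass followed by a
-- regrouping pass over the tally's items (objective: alternative decomposition, same cost).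

-- ===== PORT A =====
-- one iteration of A's inner loop body (the 'else' branch mutates d[word] in place → Dict.modify;
-- the key is present there, so the default PySem.Dict.empty is never read)
def aWordStep (d : PySem.Dict String (PySem.Dict String Int))
    (tagged_word : String × String) : PySem.Dict String (PySem.Dict String Int) :=
  let clean_tag := tagged_word.2
  if d.contains tagged_word.1 = false then
    d.insert tagged_word.1 ((PySem.Dict.empty : PySem.Dict String Int).insert clean_tag 1)
  else
    d.modify tagged_word.1 PySem.Dict.empty (fun tags_dict =>
      if tags_dict.contains clean_tag = false then tags_dict.insert clean_tag 1
      else tags_dict.modify clean_tag 0 (· + 1))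

def create_tags_per_each_word_dict (tagged_text : List (List (String × String))) : List (String × List (String × Int)) :=
  (tagged_text.foldl (fun d sent => sent.foldl aWordStep d)
      (PySem.Dict.empty : PySem.Dict String (PySem.Dict String Int))).items.map
    (fun p => (p.1, p.2.items))

-- ===== PORT B =====
-- one iteration of B's second loop: ensure result[word] exists, then result[word][tag] = n
def bGroupStep (result : PySem.Dict String (PySem.Dict String Int))
    (e : (String × String) × Int) : PySem.Dict String (PySem.Dict String Int) :=
  let result := if result.contains e.1.1 = false then result.insert e.1.1 PySem.Dict.empty else result
  result.modify e.1.1 PySem.Dict.empty (fun td => td.insert e.1.2 e.2)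

def create_tags_per_each_word_dict_alt (tagged_text : List (List (String × String))) : List (String × List (String × Int)) :=
  let counts := tagged_text.foldl
    (fun c sent => sent.foldl (fun c pair => c.insert pair (c.getD pair 0 + 1)) c)
    (PySem.Dict.empty : PySem.Dict (String × String) Int)
  (counts.items.foldl bGroupStep
      (PySem.Dict.empty : PySem.Dict String (PySem.Dict String Int))).items.map
    (fun p => (p.1, p.2.items))

-- ===== PRECONDITION & SPEC =====
def Spec_create_tags_per_each_word_dict (tagged_text : List (List (String × String))) (out : List (String × List (String × Int))) : Prop := out = create_tags_per_each_word_dict_alt tagged_text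
instance (tagged_text : List (List (String × String))) (out : List (String × List (String × Int))) : Decidable (Spec_create_tags_per_each_word_dict tagged_text out) := by unfold Spec_create_tags_per_each_word_dict; infer_instance

-- ===== CLAIM (what is proved, stated in full; the proofs are below) =====
def Claim_equal_create_tags_per_each_word_dict : Prop := ∀ (tagged_text : List (List (String × String))), Dom_create_tags_per_each_word_dict tagged_text → Spec_create_tags_per_each_word_dict tagged_text (create_tags_per_each_word_dict tagged_text)

-- ===== LEMMAS AND PROOFS =====

-- the flat list of (word, tag) pairs, and the common specification of both nested dicts
def pvFlat (tagged_text : List (List (String × String))) : List (String × String) :=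
  tagged_text.flatMap id

def pvTags (l : List (String × String)) (w : String) : List String :=
  (l.filter (fun p => p.1 == w)).map Prod.snd

def pvInner (l : List (String × String)) (w : String) : PySem.Dict String Int :=
  PySem.Dict.mk ((PySem.Set.ofList (pvTags l w)).map (fun t => (t, ((pvTags l w).count t : Int))))

def pvSpec (l : List (String × String)) : List (String × PySem.Dict String Int) :=
  (PySem.Set.ofList (l.map Prod.fst)).map (fun w => (w, pvInner l w))

def pvGroup (q : List ((String × String) × Int)) : List (String × PySem.Dict String Int) :=
  (PySem.Set.ofList (q.map (fun e => e.1.1))).map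
    (fun w => (w, PySem.Dict.mk ((q.filter (fun e => e.1.1 == w)).map (fun e => (e.1.2, e.2)))))

lemma pv_foldl_flatMap {α δ : Type} (f : δ → α → δ) (tt : List (List α)) (init : δ) :
    tt.foldl (fun d s => s.foldl f d) init = (tt.flatMap id).foldl f init := by
  induction tt generalizing init with
  | nil => rfl
  | cons s tt ih => simp [List.flatMap_cons, List.foldl_append, ih]

lemma pv_ofList_append_singleton {α : Type} [BEq α] (xs : List α) (x : α) :
    PySem.Set.ofList (xs ++ [x]) = (PySem.Set.ofList xs).add x := by
  simp [PySem.Set.ofList, List.foldl_append]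

-- tabulated assoc lists
lemma pv_tab_contains {α β : Type} [BEq α] [LawfulBEq α] (ws : List α) (f : α → β) (k : α) :
    (PySem.Dict.mk (ws.map (fun w => (w, f w)))).contains k = decide (k ∈ ws) := by
  induction ws with
  | nil => simp [PySem.Dict.contains]
  | cons w ws ih =>
    simp only [PySem.Dict.contains, List.map_cons, List.any_cons] at *
    by_cases h : w = k
    · simp [h]
    · have h2 : ¬ k = w := fun hc => h hc.symm
      simp [h, h2, ih]

lemma pv_tab_getD {α β : Type} [BEq α] [LawfulBEq α] (ws : List α) (f : α → β) (k : α) (d : β) :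
    k ∈ ws → (PySem.Dict.mk (ws.map (fun w => (w, f w)))).getD k d = f k := by
  induction ws with
  | nil => intro hk; simp at hk
  | cons w ws ih =>
    intro hk
    by_cases h : w = k
    · simp [PySem.Dict.getD, PySem.Dict.get?, h]
    · rcases List.mem_cons.mp hk with hk | hk
      · exact absurd hk.symm h
      · simpa [PySem.Dict.getD, PySem.Dict.get?, h] using ih hk

lemma pv_tags_append (l : List (String × String)) (w t w' : String) :
    pvTags (l ++ [(w, t)]) w' = pvTags l w' ++ (if w == w' then [t] else []) := by
  by_cases h : w == w' <;> simp [pvTags, List.filter_append, h]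

lemma pv_tags_nil (l : List (String × String)) (w : String) (h : w ∉ l.map Prod.fst) :
    pvTags l w = [] := by
  simp only [pvTags, List.map_eq_nil_iff]
  rw [List.filter_eq_nil_iff]
  intro p hp hbeq
  exact h (List.mem_map.mpr ⟨p, hp, eq_of_beq hbeq⟩)

lemma pv_mem_ofList_sub {α : Type} [BEq α] [LawfulBEq α] {xs : List α} {y : α}
    (h : y ∈ PySem.Set.ofList xs) : y ∈ xs := (PySem.Set.mem_ofList xs y).mp h

lemma pv_add_of_mem {α : Type} [BEq α] [LawfulBEq α] (s : PySem.Set α) (x : α) (h : x ∈ s) :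
    s.add x = s := by
  simp [PySem.Set.add, PySem.Set.contains, h]

lemma pv_add_of_not_mem {α : Type} [BEq α] [LawfulBEq α] (s : PySem.Set α) (x : α) (h : x ∉ s) :
    s.add x = s ++ [x] := by
  simp [PySem.Set.add, PySem.Set.contains, h]

lemma pv_ofList_map {α β : Type} [BEq α] [LawfulBEq α] [BEq β] [LawfulBEq β]
    (f : α → β) (l : List α) :
    PySem.Set.ofList ((PySem.Set.ofList l).map f) = PySem.Set.ofList (l.map f) := by
  induction l using List.reverseRecOn with
  | nil => rfl
  | append_singleton l x ih =>
    rw [pv_ofList_append_singleton, List.map_append, List.map_singleton,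
      pv_ofList_append_singleton]
    by_cases h : x ∈ l
    · rw [pv_add_of_mem _ _ ((PySem.Set.mem_ofList l x).mpr h), ih,
        pv_add_of_mem _ _ ((PySem.Set.mem_ofList (l.map f) (f x)).mpr (List.mem_map_of_mem h))]
    · rw [pv_add_of_not_mem _ _ (fun hc => h (pv_mem_ofList_sub hc)), List.map_append,
        List.map_singleton, pv_ofList_append_singleton, ih]

lemma pv_ofList_filter {α : Type} [BEq α] [LawfulBEq α] (p : α → Bool) (l : List α) :
    PySem.Set.ofList (l.filter p) = (PySem.Set.ofList l).filter p := by
  induction l using List.reverseRecOn with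
  | nil => rfl
  | append_singleton l x ih =>
    rw [List.filter_append, pv_ofList_append_singleton]
    by_cases h : x ∈ l
    · rw [pv_add_of_mem _ _ ((PySem.Set.mem_ofList l x).mpr h)]
      by_cases hp : p x
      · have hx : x ∈ l.filter p := List.mem_filter.mpr ⟨h, hp⟩
        simp only [hp, List.filter_cons_of_pos, List.filter_nil]
        rw [pv_ofList_append_singleton, pv_add_of_mem _ _ ((PySem.Set.mem_ofList _ x).mpr hx), ih]
      · simp only [hp, Bool.false_eq_true, not_false_eq_true, List.filter_cons_of_neg,
          List.filter_nil, List.append_nil]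
        exact ih
    · rw [pv_add_of_not_mem _ _ (fun hc => h (pv_mem_ofList_sub hc)), List.filter_append]
      by_cases hp : p x
      · have hx : x ∉ l.filter p := fun hc => h (List.mem_filter.mp hc).1
        simp only [hp, List.filter_cons_of_pos, List.filter_nil]
        rw [pv_ofList_append_singleton, pv_add_of_not_mem _ _ (fun hc => hx (pv_mem_ofList_sub hc)), ih]
      · simp only [hp, Bool.false_eq_true, not_false_eq_true, List.filter_cons_of_neg,
          List.filter_nil, List.append_nil]
        exact ih

lemma pv_ofList_map_snd (w : String) (m : List (String × String))
    (h : ∀ p ∈ m, p.1 = w) :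
    PySem.Set.ofList (m.map Prod.snd) = (PySem.Set.ofList m).map Prod.snd := by
  induction m using List.reverseRecOn with
  | nil => rfl
  | append_singleton m x ih =>
    have h' : ∀ p ∈ m, p.1 = w := fun p hp => h p (List.mem_append_left _ hp)
    have hx : x.1 = w := h x (List.mem_append_right _ (List.mem_singleton.mpr rfl))
    rw [List.map_append, List.map_singleton, pv_ofList_append_singleton,
      pv_ofList_append_singleton, ih h']
    by_cases hmem : x ∈ m
    · rw [pv_add_of_mem _ _ (List.mem_map_of_mem ((PySem.Set.mem_ofList m x).mpr hmem)),
        pv_add_of_mem _ _ ((PySem.Set.mem_ofList m x).mpr hmem)]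
    · have hsnd : x.2 ∉ (PySem.Set.ofList m).map Prod.snd := by
        intro hc
        rcases List.mem_map.mp hc with ⟨p, hp, hps⟩
        have hpm := pv_mem_ofList_sub hp
        exact hmem (by
          have : p = x := Prod.ext (by rw [h' p hpm, hx]) hps
          rwa [this] at hpm)
      rw [pv_add_of_not_mem _ _ hsnd,
        pv_add_of_not_mem _ _ (fun hc => hmem (pv_mem_ofList_sub hc)),
        List.map_append, List.map_singleton]

lemma pv_count_filter (l : List (String × String)) (w t : String) :
    l.count (w, t) = (pvTags l w).count t := by
  induction l with
  | nil => rfl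
  | cons p l ih =>
    simp only [pvTags] at ih ⊢
    by_cases h1 : p.1 = w
    · by_cases h2 : p.2 = t
      · have hp : p = (w, t) := Prod.ext h1 h2
        subst hp
        simp [ih]
      · have hne : p ≠ (w, t) := fun hc => h2 (by rw [hc])
        simp [h1, h2, hne, ih]
    · have hne : p ≠ (w, t) := fun hc => h1 (by rw [hc])
      simp [h1, hne, ih]

lemma pv_tab_insert {α β : Type} [BEq α] [LawfulBEq α] (ws : List α) (f : α → β) (k : α) (v : β)
    (hk : k ∈ ws) :
    (PySem.Dict.mk (ws.map (fun w => (w, f w)))).insert k v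
      = PySem.Dict.mk (ws.map (fun w => if w == k then (k, v) else (w, f w))) := by
  have hc : (PySem.Dict.mk (ws.map (fun w => (w, f w)))).contains k = true := by
    rw [pv_tab_contains]; exact decide_eq_true hk
  simp only [PySem.Dict.insert, hc, List.map_map]
  rfl


lemma pv_getD_append_fresh {β : Type} (xs : List (String × β)) (k : String) (v : β) (d : β)
    (h : ∀ p ∈ xs, p.1 ≠ k) :
    (PySem.Dict.mk (xs ++ [(k, v)])).getD k d = v := by
  have hfind : xs.find? (fun p => p.1 == k) = none := by
    rw [List.find?_eq_none]
    intro p hp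
    simpa using h p hp
  simp [PySem.Dict.getD, PySem.Dict.get?, List.find?_append, hfind]

lemma pv_insert_append_fresh {β : Type} (xs : List (String × β)) (k : String) (v v' : β)
    (h : ∀ p ∈ xs, p.1 ≠ k) :
    (PySem.Dict.mk (xs ++ [(k, v)])).insert k v' = PySem.Dict.mk (xs ++ [(k, v')]) := by
  have hc : (PySem.Dict.mk (xs ++ [(k, v)])).contains k = true := by
    simp [PySem.Dict.contains]
  simp only [PySem.Dict.insert, hc, List.map_append]
  apply PySem.Dict.ext
  show _ ++ _ = xs ++ [(k, v')]
  congr 1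
  · conv_rhs => rw [← List.map_id xs]
    apply List.map_congr_left
    intro p hp
    simp [h p hp]
  · simp

lemma pv_empty_insert {β : Type} (t : String) (n : β) :
    (PySem.Dict.empty : PySem.Dict String β).insert t n = PySem.Dict.mk [(t, n)] := rfl

lemma pv_insert_not_contains {α β : Type} [BEq α] (d : PySem.Dict α β) (k : α) (v : β)
    (h : d.contains k = false) : d.insert k v = PySem.Dict.mk (d.items ++ [(k, v)]) := by
  simp [PySem.Dict.insert, h]

lemma pv_inner_step (l : List (String × String)) (w t : String) :
    (if (pvInner l w).contains t = false then (pvInner l w).insert t 1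
     else (pvInner l w).modify t 0 (· + 1)) = pvInner (l ++ [(w, t)]) w := by
  have htags : pvTags (l ++ [(w, t)]) w = pvTags l w ++ [t] := by
    simp [pv_tags_append]
  have hcont : (pvInner l w).contains t = decide (t ∈ pvTags l w) := by
    rw [pvInner, pv_tab_contains]
    simp [PySem.Set.mem_ofList]
  by_cases ht : t ∈ pvTags l w
  · rw [hcont]
    simp only [ht, decide_true, Bool.true_eq_false, if_false]
    rw [PySem.Dict.modify, pvInner,
      pv_tab_getD _ _ _ _ ((PySem.Set.mem_ofList _ t).mpr ht),
      pv_tab_insert _ _ _ _ ((PySem.Set.mem_ofList _ t).mpr ht)]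
    unfold pvInner
    rw [htags, pv_ofList_append_singleton, pv_add_of_mem _ _ ((PySem.Set.mem_ofList _ t).mpr ht)]
    congr 1
    apply List.map_congr_left
    intro t' ht'
    by_cases h' : t' = t
    · subst h'
      simp [List.count_append]
    · simp [h', Ne.symm h', List.count_append]
  · rw [hcont]
    simp only [ht, decide_false, if_true]
    rw [pvInner, pv_insert_not_contains _ _ _ (by rw [pv_tab_contains]; simp [PySem.Set.mem_ofList, ht])]
    unfold pvInner
    rw [htags, pv_ofList_append_singleton,
      pv_add_of_not_mem _ _ (fun hc => ht (pv_mem_ofList_sub hc)), List.map_append]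
    congr 1
    congr 1
    · apply List.map_congr_left
      intro t' ht'
      have h' : t' ≠ t := fun hc => ht (hc ▸ pv_mem_ofList_sub ht')
      simp [List.count_append, Ne.symm h']
    · have : (pvTags l w).count t = 0 := List.count_eq_zero.mpr ht
      simp [List.count_append, this]

lemma pv_spec_mem_ne (l : List (String × String)) (w w' : String)
    (hw : w ∉ l.map Prod.fst) (hw' : w' ∈ PySem.Set.ofList (l.map Prod.fst)) : w' ≠ w :=
  fun hc => hw (hc ▸ pv_mem_ofList_sub hw')

lemma pv_inner_unchanged (l : List (String × String)) (w t w' : String) (h : w' ≠ w) :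
    pvInner (l ++ [(w, t)]) w' = pvInner l w' := by
  unfold pvInner
  rw [pv_tags_append]
  simp [Ne.symm h]

lemma pv_aStep (l : List (String × String)) (p : String × String) :
    aWordStep (PySem.Dict.mk (pvSpec l)) p = PySem.Dict.mk (pvSpec (l ++ [p])) := by
  obtain ⟨w, t⟩ := p
  have hcont : (PySem.Dict.mk (pvSpec l)).contains w = decide (w ∈ l.map Prod.fst) := by
    rw [pvSpec, pv_tab_contains]
    simp [PySem.Set.mem_ofList]
  by_cases hw : w ∈ l.map Prod.fst
  · unfold aWordStep
    rw [hcont]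
    simp only [hw, decide_true, Bool.true_eq_false, if_false]
    rw [PySem.Dict.modify, pvSpec,
      pv_tab_getD _ _ _ _ ((PySem.Set.mem_ofList _ w).mpr hw)]
    have hg : (if (pvInner l w).contains t = false then (pvInner l w).insert t 1
        else (pvInner l w).modify t 0 (· + 1)) = pvInner (l ++ [(w, t)]) w := pv_inner_step l w t
    rw [hg, pv_tab_insert _ _ _ _ ((PySem.Set.mem_ofList _ w).mpr hw)]
    unfold pvSpec
    rw [List.map_append, List.map_singleton, pv_ofList_append_singleton,
      pv_add_of_mem _ _ ((PySem.Set.mem_ofList _ w).mpr hw)]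
    congr 1
    apply List.map_congr_left
    intro w' hw'
    by_cases h' : w' = w
    · subst h'; simp
    · simp [h', pv_inner_unchanged l w t w' h']
  · unfold aWordStep
    rw [hcont]
    simp only [hw, decide_false, if_true]
    rw [pvSpec, pv_insert_not_contains _ _ _ (by rw [pv_tab_contains]; simp [PySem.Set.mem_ofList, hw])]
    unfold pvSpec
    rw [List.map_append, List.map_singleton, pv_ofList_append_singleton,
      pv_add_of_not_mem _ _ (fun hc => hw (pv_mem_ofList_sub hc)), List.map_append]
    congr 1
    congr 1
    · apply List.map_congr_left
      intro w' hw'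
      have h' : w' ≠ w := pv_spec_mem_ne l w w' hw hw'
      simp [pv_inner_unchanged l w t w' h']
    · have htags : pvTags (l ++ [(w, t)]) w = [t] := by
        rw [pv_tags_append, pv_tags_nil l w hw]; simp
      simp [pvInner, htags, pv_empty_insert, PySem.Set.ofList, PySem.Set.add,
        PySem.Set.empty, PySem.Set.contains]

lemma pv_A_fold (l : List (String × String)) :
    l.foldl aWordStep (PySem.Dict.empty : PySem.Dict String (PySem.Dict String Int))
      = PySem.Dict.mk (pvSpec l) := by
  induction l using List.reverseRecOn with
  | nil => rfl
  | append_singleton l p ih =>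
    rw [List.foldl_append, List.foldl_cons, List.foldl_nil, ih, pv_aStep]

lemma pv_group_keys_ne (q : List ((String × String) × Int)) (w : String)
    (hw : w ∉ q.map (fun e => e.1.1)) : ∀ p ∈ pvGroup q, p.1 ≠ w := by
  intro p hp
  rcases List.mem_map.mp hp with ⟨w', hw', rfl⟩
  exact fun hc => hw (hc ▸ pv_mem_ofList_sub hw')

lemma pv_bStep (q : List ((String × String) × Int)) (e : (String × String) × Int)
    (hfresh : e.1 ∉ q.map Prod.fst) :
    bGroupStep (PySem.Dict.mk (pvGroup q)) e = PySem.Dict.mk (pvGroup (q ++ [e])) := by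
  obtain ⟨⟨w, t⟩, n⟩ := e
  simp only [List.mem_map, not_exists, not_and] at hfresh
  have hcont : (PySem.Dict.mk (pvGroup q)).contains w = decide (w ∈ q.map (fun e => e.1.1)) := by
    rw [pvGroup, pv_tab_contains]
    simp [PySem.Set.mem_ofList]
  by_cases hw : w ∈ q.map (fun e => e.1.1)
  · unfold bGroupStep
    rw [hcont]
    simp only [hw, decide_true, Bool.true_eq_false, if_false]
    rw [PySem.Dict.modify, pvGroup,
      pv_tab_getD _ _ _ _ ((PySem.Set.mem_ofList _ w).mpr hw)]
    have hnt : t ∉ ((q.filter (fun e' => e'.1.1 == w)).map (fun e' => (e'.1.2, e'.2))).map Prod.fst := by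
      intro hc
      rcases List.mem_map.mp hc with ⟨x, hx, hxt⟩
      rcases List.mem_map.mp hx with ⟨e', he', rfl⟩
      have he'f := List.mem_filter.mp he'
      exact hfresh e' he'f.1 (Prod.ext (eq_of_beq he'f.2) hxt)
    have hins : (PySem.Dict.mk ((q.filter (fun e' => e'.1.1 == w)).map (fun e' => (e'.1.2, e'.2)))).insert t n
        = PySem.Dict.mk (((q.filter (fun e' => e'.1.1 == w)).map (fun e' => (e'.1.2, e'.2))) ++ [(t, n)]) := by
      apply pv_insert_not_contains
      simp only [PySem.Dict.contains, List.any_eq_false]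
      intro p hp
      have hne : p.1 ≠ t := fun hc => hnt (by rw [← hc]; exact List.mem_map_of_mem hp)
      simp [hne]
    rw [hins, pv_tab_insert _ _ _ _ ((PySem.Set.mem_ofList _ w).mpr hw)]
    unfold pvGroup
    rw [List.map_append, List.map_singleton, pv_ofList_append_singleton,
      pv_add_of_mem _ _ ((PySem.Set.mem_ofList _ w).mpr hw)]
    congr 1
    apply List.map_congr_left
    intro w' hw'
    by_cases h' : w' = w
    · subst h'
      simp only [BEq.rfl]
      rw [List.filter_append]
      simp
    · simp [h', Ne.symm h']
  · unfold bGroupStep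
    rw [hcont]
    simp only [hw, decide_false, if_true]
    rw [pv_insert_not_contains _ _ _ (by rw [pvGroup, pv_tab_contains]; simp [PySem.Set.mem_ofList, hw])]
    rw [PySem.Dict.modify,
      pv_getD_append_fresh _ _ _ _ (pv_group_keys_ne q w hw),
      pv_insert_append_fresh _ _ _ _ (pv_group_keys_ne q w hw)]
    unfold pvGroup
    rw [List.map_append, List.map_singleton, pv_ofList_append_singleton,
      pv_add_of_not_mem _ _ (fun hc => hw (pv_mem_ofList_sub hc)), List.map_append]
    congr 1
    congr 1
    · apply List.map_congr_left
      intro w' hw'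
      have h' : w' ≠ w := fun hc => hw (hc ▸ pv_mem_ofList_sub hw')
      simp [Ne.symm h']
    · have hfil : q.filter (fun e' => e'.1.1 == w) = [] := by
        rw [List.filter_eq_nil_iff]
        intro e' he' hbeq
        exact hw (List.mem_map.mpr ⟨e', he', eq_of_beq hbeq⟩)
      simp [hfil, List.filter_append, pv_empty_insert]

lemma pv_B_fold (q : List ((String × String) × Int)) (h : (q.map Prod.fst).Nodup) :
    q.foldl bGroupStep (PySem.Dict.empty : PySem.Dict String (PySem.Dict String Int))
      = PySem.Dict.mk (pvGroup q) := by
  induction q using List.reverseRecOn with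
  | nil => rfl
  | append_singleton q e ih =>
    rw [List.map_append, List.map_singleton] at h
    have h1 : (q.map Prod.fst).Nodup := h.of_append_left
    have h2 : e.1 ∉ q.map Prod.fst := by
      have := List.disjoint_of_nodup_append h
      intro hc
      exact this hc (List.mem_singleton.mpr rfl)
    rw [List.foldl_append, List.foldl_cons, List.foldl_nil, ih h1, pv_bStep q e h2]

lemma pv_group_inst (l : List (String × String)) :
    pvGroup ((PySem.Set.ofList l).map (fun k => (k, (l.count k : Int)))) = pvSpec l := by
  unfold pvGroup pvSpec
  rw [List.map_map]
  have hcomp : ((fun e => e.1.1) ∘ fun k => (k, (l.count k : Int))) = Prod.fst := rfl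
  rw [hcomp, pv_ofList_map Prod.fst l]
  apply List.map_congr_left
  intro w hw
  congr 1
  rw [List.filter_map]
  have hpred : ((fun e => e.1.1 == w) ∘ fun k => (k, (l.count k : Int))) = (fun p => p.1 == w) := rfl
  rw [hpred, List.map_map]
  rw [← pv_ofList_filter (fun p => p.1 == w) l]
  unfold pvInner
  simp only [pvTags]
  have hm : ∀ p ∈ l.filter (fun p => p.1 == w), p.1 = w := by
    intro p hp
    exact eq_of_beq (List.mem_filter.mp hp).2
  rw [pv_ofList_map_snd w _ hm, List.map_map]
  congr 1
  apply List.map_congr_left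
  intro k hk
  have hk' := pv_mem_ofList_sub hk
  have hk1 : k.1 = w := hm k hk'
  have hcnt : l.count k = (pvTags l w).count k.2 := by
    have hkeq : k = (w, k.2) := Prod.ext hk1 rfl
    rw [hkeq, pv_count_filter]
  simp only [pvTags] at hcnt
  simp only [Function.comp_apply, hcnt]

lemma pv_portA_eq (tagged_text : List (List (String × String))) :
    create_tags_per_each_word_dict tagged_text
      = (PySem.Dict.mk (pvSpec (pvFlat tagged_text))).items.map (fun p => (p.1, p.2.items)) := by
  unfold create_tags_per_each_word_dict pvFlat
  rw [pv_foldl_flatMap, pv_A_fold]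

lemma pv_portB_eq (tagged_text : List (List (String × String))) :
    create_tags_per_each_word_dict_alt tagged_text
      = (PySem.Dict.mk (pvSpec (pvFlat tagged_text))).items.map (fun p => (p.1, p.2.items)) := by
  unfold create_tags_per_each_word_dict_alt pvFlat
  rw [pv_foldl_flatMap, PySem.Dict.foldl_insert_getD_add_one_eq_counter]
  simp only [PySem.Dict.items_counter]
  have hnd : ((((PySem.Set.ofList (tagged_text.flatMap id)).map
      (fun k => (k, ((tagged_text.flatMap id).count k : Int))))).map Prod.fst).Nodup := by
    rw [List.map_map]
    have : (Prod.fst ∘ fun k => (k, ((tagged_text.flatMap id).count k : Int))) = fun k => k := rfl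
    rw [this, List.map_id_fun']
    exact PySem.Set.nodup_ofList _
  rw [pv_B_fold _ hnd, pv_group_inst]


-- ===== VERDICT (by name: the statement is the Claim_ definition above) =====
theorem create_tags_per_each_word_dict_spec : Claim_equal_create_tags_per_each_word_dict := by
  intro tagged_text _
  unfold Spec_create_tags_per_each_word_dict
  rw [pv_portA_eq, pv_portB_eq]
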